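-- pv_equiv track=rewrite | github.com/abdelmageed95/Predicting-Data-Exfiltration-via-DNS-Using-ML-and-Kafka-for-Streaming-Data- | src/features/build_features.py | get_FQDN
-- ===== SOURCE A (Python) =====
-- def get_FQDN(url):
--   count= 0
--   for elem in url:
--       if elem==".":
--           continue
--       else:
--           count += 1
--   return count
-- ===== SOURCE B (Python) =====
-- def get_FQDN(url):
--     return len(url) - url.count('.')
-- ===== Notes on version B (the rewrite author's own statement) =====
-- stated objective: simpler
-- what changed: B replaces A's per-character accumulation loop with arithmetic on two aggregates: total length minus the number of dots (len(url) - url.count('.')).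
import Mathlib
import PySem

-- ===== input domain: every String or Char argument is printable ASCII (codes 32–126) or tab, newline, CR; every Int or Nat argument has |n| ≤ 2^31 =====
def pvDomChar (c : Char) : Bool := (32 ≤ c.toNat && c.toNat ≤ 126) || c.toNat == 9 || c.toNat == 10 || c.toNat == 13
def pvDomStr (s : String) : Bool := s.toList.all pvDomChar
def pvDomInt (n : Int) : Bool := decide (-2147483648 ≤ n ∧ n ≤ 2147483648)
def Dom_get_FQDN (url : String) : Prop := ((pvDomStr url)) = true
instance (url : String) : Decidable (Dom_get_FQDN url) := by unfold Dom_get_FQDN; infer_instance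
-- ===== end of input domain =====

-- B computes the non-dot count as length minus dot count instead of A's per-character loop (objective: simpler).
-- ===== PORT A =====
def get_FQDN (url : String) : Int :=
  url.toList.foldl (fun count elem => if elem == '.' then count else count + 1) 0

-- ===== PORT B =====
def get_FQDN_alt (url : String) : Int :=
  PySem.Str.len url - (PySem.Str.count url "." : Int)

-- ===== PRECONDITION & SPEC =====
def Spec_get_FQDN (url : String) (out : Int) : Prop := out = get_FQDN_alt url
instance (url : String) (out : Int) : Decidable (Spec_get_FQDN url out) := by unfold Spec_get_FQDN; infer_instance

-- ===== CLAIM (what is proved, stated in full; the proofs are below) =====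
def Claim_equal_get_FQDN : Prop := ∀ (url : String), Dom_get_FQDN url → Spec_get_FQDN url (get_FQDN url)

-- ===== LEMMAS AND PROOFS =====

-- single-char substring count coincides with list element count
theorem count_go_singleton (c : Char) (cs : List Char) (fuel acc : Nat)
    (h : cs.length ≤ fuel) :
    PySem.Chars.count.go [c] fuel cs acc = acc + cs.count c := by
  induction cs generalizing fuel acc with
  | nil => cases fuel <;> simp [PySem.Chars.count.go]
  | cons x t ih =>
    cases fuel with
    | zero => simp at h
    | succ n =>
      simp only [PySem.Chars.count.go, List.isPrefixOf,
        Bool.and_true]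
      by_cases hx : x = c
      · subst hx
        simp only [beq_self_eq_true, if_true, List.length_singleton,
          List.drop_succ_cons, List.drop_zero]
        rw [ih n (acc + 1) (by simp at h; omega)]
        simp
        omega
      · have hb : (c == x) = false := by
          simp only [beq_eq_false_iff_ne, ne_eq]
          exact fun hh => hx hh.symm
        rw [hb]
        simp only [Bool.false_eq_true, if_false]
        rw [ih n acc (by simp at h; omega)]
        simp [hx]

theorem count_singleton (c : Char) (cs : List Char) :
    PySem.Chars.count cs [c] = cs.count c := by
  simp only [PySem.Chars.count, List.isEmpty_cons, Bool.false_eq_true, if_false]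
  simpa using count_go_singleton c cs cs.length 0 (le_refl _)

-- A's loop accumulates the number of non-dot characters
theorem foldA (l : List Char) (a : Int) :
    l.foldl (fun count elem => if elem == '.' then count else count + 1) a
      = a + ((l.countP (fun c => !(c == '.'))) : Int) := by
  induction l generalizing a with
  | nil => simp
  | cons x t ih =>
    rw [List.foldl_cons, ih, List.countP_cons]
    cases hx : (x == '.') <;> simp [hx] <;> omega

-- ===== VERDICT (by name: the statement is the Claim_ definition above) =====
theorem get_FQDN_spec : Claim_equal_get_FQDN := by
  intro url _
  unfold Spec_get_FQDN get_FQDN get_FQDN_alt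
  rw [foldA, PySem.Str.len_eq]
  have h1 : PySem.Str.count url "." = url.toList.count '.' := by
    rw [PySem.Str.count_eq]
    exact count_singleton '.' url.toList
  have h4 : url.toList.count '.' = url.toList.countP (fun c => c == '.') := rfl
  have h3 := List.length_eq_countP_add_countP (p := fun c => c == '.') (l := url.toList)
  have hc : url.toList.countP (fun c => !(c == '.'))
      = url.toList.countP (fun a => decide ¬((a == '.') = true)) := by
    refine List.countP_congr ?_
    intro a _
    cases ha : (a == '.') <;> simp [ha]
  rw [h1, h4, hc]
  omega
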